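-- pv_equiv track=rewrite | github.com/pmoracho/pboletin | PdfProcessor.py | conectar_horizontales
-- ===== SOURCE A (Python) =====
-- def conectar_horizontales(mylista, level=50):
--
-- 	newlist = mylista[:]
--
-- 	verticales = [l for l in mylista if l[0] == l[2]]
-- 	horizontales = [l for l in mylista if l[1] == l[3]]
--
-- 	xvert = {}
-- 	for i in [l[0] for l in verticales]:
-- 		for j in range(0, level):
-- 			xvert[i+j] = i
-- 			xvert[i-j] = i
--
-- 	for i,l in enumerate(horizontales):
-- 		horizontales[i][0] = xvert.get(horizontales[i][0],horizontales[i][0])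
-- 		horizontales[i][2] = xvert.get(horizontales[i][2],horizontales[i][2])
--
-- 	return newlist
-- ===== SOURCE B (Python) =====
-- def conectar_horizontales(mylista, level=50):
--     # same in-place mutation of the shared horizontal line lists as the original
--     verticals_x = [l[0] for l in mylista if l[0] == l[2]]
--
--     def snap(v):
--         # last vertical wins, as in the original's dict-overwrite order
--         for x in reversed(verticals_x):
--             if abs(v - x) < level:
--                 return x
--         return v
--
--     for l in mylista:
--         if l[1] == l[3]:
--             l[0] = snap(l[0])
--             l[2] = snap(l[2])
--
--     return mylista[:]
-- ===== Notes on version B (the rewrite author's own statement) =====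
-- stated objective: alternative
-- what changed: Drops the precomputed xvert offset dictionary (2*level keys per vertical) entirely: each horizontal endpoint is snapped by scanning the vertical x-coordinates in reverse for the first one within level of it (same last-vertical-wins result); trades the O(V*level) table-build for an O(V) scan per horizontal endpoint.
import Mathlib
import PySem

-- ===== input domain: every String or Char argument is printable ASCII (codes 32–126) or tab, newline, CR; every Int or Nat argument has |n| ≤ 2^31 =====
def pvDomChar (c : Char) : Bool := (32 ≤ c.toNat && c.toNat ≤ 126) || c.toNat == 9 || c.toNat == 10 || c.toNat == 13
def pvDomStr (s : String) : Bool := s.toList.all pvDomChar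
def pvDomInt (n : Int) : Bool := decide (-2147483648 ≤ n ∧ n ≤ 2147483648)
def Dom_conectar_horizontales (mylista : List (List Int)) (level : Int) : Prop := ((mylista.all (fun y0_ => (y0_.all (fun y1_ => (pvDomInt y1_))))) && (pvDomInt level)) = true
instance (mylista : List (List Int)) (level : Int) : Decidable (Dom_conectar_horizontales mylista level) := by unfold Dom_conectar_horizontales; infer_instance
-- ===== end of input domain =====

-- B replaces A's precomputed 2*level-key offset dictionary with a reverse scan of the
-- vertical x-coordinates per horizontal endpoint (objective: simpler). Both A and B
-- mutate the shared inner horizontal line lists in place; the equivalence proved here is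
-- about the returned value (which reflects those mutations identically in both).


-- ===== PORT A =====
-- Python mutates the inner lists of `horizontales` in place; since `newlist` is a shallow
-- copy sharing those inner lists, the returned value is mylista with every horizontal
-- line's endpoints rewritten — rendered here (value semantics) as a map over mylista
-- guarded by the horizontal test l[1] == l[3].
def conectar_horizontales (mylista : List (List Int)) (level : Int) : List (List Int) :=
  let verticales := mylista.filter (fun l => l.getD 0 0 == l.getD 2 0)
  let xvert : PySem.Dict Int Int :=
    (verticales.map (fun l => l.getD 0 0)).foldl
      (fun d i =>
        (PySem.List.pyRange 0 level 1).foldl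
          (fun d j => (d.insert (i + j) i).insert (i - j) i) d)
      PySem.Dict.empty
  mylista.map (fun l =>
    if l.getD 1 0 == l.getD 3 0 then
      let l1 := l.set 0 (xvert.getD (l.getD 0 0) (l.getD 0 0))
      l1.set 2 (xvert.getD (l1.getD 2 0) (l1.getD 2 0))
    else l)

-- ===== PORT B =====
def conectar_horizontales_alt (mylista : List (List Int)) (level : Int) : List (List Int) :=
  let verticals_x := (mylista.filter (fun l => l.getD 0 0 == l.getD 2 0)).map (fun l => l.getD 0 0)
  let snap := fun (v : Int) => (verticals_x.reverse.find? (fun x => decide (|v - x| < level))).getD v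
  mylista.map (fun l =>
    if l.getD 1 0 == l.getD 3 0 then
      (l.set 0 (snap (l.getD 0 0))).set 2 (snap (l.getD 2 0))
    else l)

-- ===== PRECONDITION & SPEC =====
-- A raises IndexError on any inner list of length < 4 (indices 0..3 are read); exactly those inputs are excluded.
def Pre_conectar_horizontales (mylista : List (List Int)) (level : Int) : Prop :=
  ∀ l ∈ mylista, 4 ≤ l.length
instance (mylista : List (List Int)) (level : Int) : Decidable (Pre_conectar_horizontales mylista level) := by unfold Pre_conectar_horizontales; infer_instance
def pvWitness_conectar_horizontales : List (List Int) × Int := ([[2, 0, 2, 9], [0, 3, 7, 3]], 3)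

def Spec_conectar_horizontales (mylista : List (List Int)) (level : Int) (out : List (List Int)) : Prop := out = conectar_horizontales_alt mylista level
instance (mylista : List (List Int)) (level : Int) (out : List (List Int)) : Decidable (Spec_conectar_horizontales mylista level out) := by unfold Spec_conectar_horizontales; infer_instance

-- ===== CLAIM (what is proved, stated in full; the proofs are below) =====
def Claim_equal_conectar_horizontales : Prop := ∀ (mylista : List (List Int)) (level : Int), Dom_conectar_horizontales mylista level → Pre_conectar_horizontales mylista level → Spec_conectar_horizontales mylista level (conectar_horizontales mylista level)

-- ===== LEMMAS AND PROOFS =====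

-- one vertical's inner write loop over an arbitrary offset list
lemma get?_foldl_insert_pair (x : Int) (L : List Int) (d : PySem.Dict Int Int) (k : Int) :
    (L.foldl (fun d j => (d.insert (x + j) x).insert (x - j) x) d).get? k =
      if ∃ j ∈ L, k = x + j ∨ k = x - j then some x else d.get? k := by
  induction L generalizing d with
  | nil => simp
  | cons j L ih =>
    rw [List.foldl_cons, ih, PySem.Dict.get?_insert, PySem.Dict.get?_insert]
    by_cases h1 : ∃ j' ∈ L, k = x + j' ∨ k = x - j'
    · rw [if_pos h1, if_pos]
      obtain ⟨j', hm, hj⟩ := h1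
      exact ⟨j', List.mem_cons_of_mem _ hm, hj⟩
    · rw [if_neg h1]
      by_cases h2 : k = x - j
      · rw [if_pos h2, if_pos ⟨j, by simp, Or.inr h2⟩]
      · rw [if_neg h2]
        by_cases h3 : k = x + j
        · rw [if_pos h3, if_pos ⟨j, by simp, Or.inl h3⟩]
        · rw [if_neg h3, if_neg]
          rintro ⟨j', hm, hj⟩
          rcases List.mem_cons.mp hm with rfl | hm
          · rcases hj with hj | hj
            · exact h3 hj
            · exact h2 hj
          · exact h1 ⟨j', hm, hj⟩

-- the membership test over range(0, level) is exactly |k - x| < level (integers)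
lemma mem_range_pair_iff (level x k : Int) :
    (∃ j ∈ PySem.List.pyRange 0 level 1, k = x + j ∨ k = x - j) ↔ |k - x| < level := by
  simp only [PySem.List.mem_pyRange_one]
  constructor
  · rintro ⟨j, ⟨h0, hl⟩, h | h⟩ <;> (rw [abs_lt]; omega)
  · intro h
    rw [abs_lt] at h
    by_cases hk : x ≤ k
    · exact ⟨k - x, ⟨by omega, by omega⟩, Or.inl (by omega)⟩
    · exact ⟨x - k, ⟨by omega, by omega⟩, Or.inr (by omega)⟩

-- one vertical's inner write loop: key k gets value x iff k lies in x's offset range, else untouched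
lemma get?_writeRange (level : Int) (x : Int) (d : PySem.Dict Int Int) (k : Int) :
    ((PySem.List.pyRange 0 level 1).foldl
        (fun d j => (d.insert (x + j) x).insert (x - j) x) d).get? k =
      if |k - x| < level then some x else d.get? k := by
  rw [get?_foldl_insert_pair]
  by_cases h : |k - x| < level
  · rw [if_pos ((mem_range_pair_iff level x k).mpr h), if_pos h]
  · rw [if_neg (fun hc => h ((mem_range_pair_iff level x k).mp hc)), if_neg h]

-- the whole xvert fold: lookup = last vertical whose range covers k
lemma get?_xvert (level : Int) (xs : List Int) (d : PySem.Dict Int Int) (k : Int) :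
    (xs.foldl
        (fun d i =>
          (PySem.List.pyRange 0 level 1).foldl
            (fun d j => (d.insert (i + j) i).insert (i - j) i) d) d).get? k =
      match xs.reverse.find? (fun x => decide (|k - x| < level)) with
      | some x => some x
      | none => d.get? k := by
  induction xs generalizing d with
  | nil => simp
  | cons x rest ih =>
    simp only [List.foldl_cons, ih, List.reverse_cons, List.find?_append]
    cases hf : rest.reverse.find? (fun x => decide (|k - x| < level)) with
    | some y => simp
    | none =>
      simp only [Option.none_or, get?_writeRange]
      by_cases h : |k - x| < level <;> simp [h]

lemma snap_eq (level : Int) (xs : List Int) (k : Int) :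
    (xs.foldl
        (fun d i =>
          (PySem.List.pyRange 0 level 1).foldl
            (fun d j => (d.insert (i + j) i).insert (i - j) i) d) PySem.Dict.empty).getD k k =
      (xs.reverse.find? (fun x => decide (|k - x| < level))).getD k := by
  rw [PySem.Dict.getD_eq_get?_getD, get?_xvert]
  cases h : xs.reverse.find? (fun x => decide (|k - x| < level)) <;> simp [PySem.Dict.get?_empty]

-- ===== VERDICT (by name: the statement is the Claim_ definition above) =====
theorem conectar_horizontales_spec : Claim_equal_conectar_horizontales := by
  intro mylista level _ _
  unfold Spec_conectar_horizontales conectar_horizontales conectar_horizontales_alt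
  simp only []
  apply List.map_congr_left
  intro l _
  split_ifs with h
  · rw [snap_eq, snap_eq]
    simp only [List.getD]
    have h2 : ∀ a : Int, (l.set 0 a)[2]? = l[2]? := fun a => List.getElem?_set_ne (by omega)
    simp only [h2]
    congr
  · rfl
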